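-- pv_equiv track=rewrite | github.com/Ehwartz/udru | data.py | generate_ul_and_rm_labels
-- ===== SOURCE A (Python) =====
-- from itertools import combinations
--
-- def generate_ul_and_rm_labels(K_ul, K):
--     candidates = list(range(K))
--     ull = [list(c) for c in combinations(candidates, K_ul)]
--     rml = []
--     for uli in ull:
--         cand = candidates.copy()
--         for label in uli:
--             cand.remove(label)
--         rml.append(cand)
--     return ull, rml
-- ===== SOURCE B (Python) =====
-- def generate_ul_and_rm_labels(K_ul, K):
--     # Single recursive enumeration that builds each subset together with its
--     # complement, instead of enumerating subsets and then deleting elements.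
--     def gen(items, k):
--         if k == 0:
--             return [([], list(items))]
--         if k < 0 or k > len(items):
--             return []
--         x, rest = items[0], items[1:]
--         taken = [(([x] + c), r) for c, r in gen(rest, k - 1)]
--         skipped = [(c, [x] + r) for c, r in gen(rest, k)]
--         return taken + skipped
--     pairs = gen(list(range(K)), K_ul)
--     return [p[0] for p in pairs], [p[1] for p in pairs]
-- ===== Notes on version B (the rewrite author's own statement) =====
-- stated objective: alternative
-- what changed: B replaces A's two-phase scheme (enumerate K_ul-combinations, then for each one copy range(K) and delete its elements one by one with list.remove) by a single recursive enumeration that builds every subset together with its complement in one pass.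
import Mathlib
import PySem

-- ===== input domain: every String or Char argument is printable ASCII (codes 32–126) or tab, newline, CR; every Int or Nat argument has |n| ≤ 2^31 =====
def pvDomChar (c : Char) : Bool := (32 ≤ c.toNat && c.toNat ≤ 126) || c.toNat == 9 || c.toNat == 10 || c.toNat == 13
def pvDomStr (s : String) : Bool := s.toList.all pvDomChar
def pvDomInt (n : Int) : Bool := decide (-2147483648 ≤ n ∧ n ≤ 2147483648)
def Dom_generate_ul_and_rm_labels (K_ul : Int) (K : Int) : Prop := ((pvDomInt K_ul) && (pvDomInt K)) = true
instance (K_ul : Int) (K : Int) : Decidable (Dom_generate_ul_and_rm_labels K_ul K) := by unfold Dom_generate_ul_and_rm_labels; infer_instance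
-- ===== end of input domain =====

-- B builds each subset together with its complement in one recursive enumeration,
-- instead of A's enumerate-then-delete scheme; equal on all inputs with K_ul ≥ 0
-- (A raises ValueError on negative K_ul, where B returns ([], [])).


-- ===== PORT A =====
-- itertools.combinations(items, k) over a list, lexicographic order
-- (like itertools, yields nothing at all when k exceeds the number of items)
def combsA : List Int → Nat → List (List Int)
  | _, 0 => [[]]
  | [], _ + 1 => []
  | x :: xs, k + 1 =>
    if xs.length + 1 < k + 1 then []
    else (combsA xs k).map (x :: ·) ++ combsA xs (k + 1)

def generate_ul_and_rm_labels (K_ul : Int) (K : Int) : List (List Int) × List (List Int) :=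
  let candidates := PySem.List.pyRange 0 K 1
  -- Pre_ ensures K_ul ≥ 0, so .toNat is exact (combinations raises ValueError on negative r)
  let ull := combsA candidates K_ul.toNat
  -- per-combination loop: copy candidates, remove each label (list.remove = first occurrence;
  -- the label is always present here, so the getD default is never taken)
  let rml := ull.map (fun uli =>
    uli.foldl (fun cand label => (PySem.List.remove? cand label).getD cand) candidates)
  (ull, rml)

-- ===== PORT B =====
-- gen(items, k) from Source B: all (subset, complement) pairs, subsets of size k
def genB (items : List Int) (k : Int) : List (List Int × List Int) :=
  if k = 0 then [([], items)]
  else if k < 0 ∨ k > (items.length : Int) then []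
  else
    match items with
    | [] => []
    | x :: rest => (genB rest (k - 1)).map (fun p => (x :: p.1, p.2))
                 ++ (genB rest k).map (fun p => (p.1, x :: p.2))
termination_by structural items

def generate_ul_and_rm_labels_alt (K_ul : Int) (K : Int) : List (List Int) × List (List Int) :=
  let pairs := genB (PySem.List.pyRange 0 K 1) K_ul
  (pairs.map Prod.fst, pairs.map Prod.snd)

-- ===== PRECONDITION & SPEC =====
-- Pre_ excludes exactly K_ul < 0, where A raises ValueError (combinations with negative r).
def Pre_generate_ul_and_rm_labels (K_ul : Int) (K : Int) : Prop := 0 ≤ K_ul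
instance (K_ul : Int) (K : Int) : Decidable (Pre_generate_ul_and_rm_labels K_ul K) := by unfold Pre_generate_ul_and_rm_labels; infer_instance
def pvWitness_generate_ul_and_rm_labels : Int × Int := (2, 4)

def Spec_generate_ul_and_rm_labels (K_ul : Int) (K : Int) (out : List (List Int) × List (List Int)) : Prop := out = generate_ul_and_rm_labels_alt K_ul K
instance (K_ul : Int) (K : Int) (out : List (List Int) × List (List Int)) : Decidable (Spec_generate_ul_and_rm_labels K_ul K out) := by unfold Spec_generate_ul_and_rm_labels; infer_instance

-- ===== CLAIM (what is proved, stated in full; the proofs are below) =====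
def Claim_equal_generate_ul_and_rm_labels : Prop := ∀ (K_ul : Int) (K : Int), Dom_generate_ul_and_rm_labels K_ul K → Pre_generate_ul_and_rm_labels K_ul K → Spec_generate_ul_and_rm_labels K_ul K (generate_ul_and_rm_labels K_ul K)

-- ===== LEMMAS AND PROOFS =====
def foldRem (cand : List Int) (uli : List Int) : List Int :=
  uli.foldl (fun cand label => (PySem.List.remove? cand label).getD cand) cand

theorem foldRem_cons_self (x : Int) (xs c : List Int) :
    foldRem (x :: xs) (x :: c) = foldRem xs c := by
  simp [foldRem, PySem.List.remove?_cons_self]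

theorem foldRem_cons_of_notmem (x : Int) (a c : List Int) (h : x ∉ c) :
    foldRem (x :: a) c = x :: foldRem a c := by
  induction c generalizing a with
  | nil => simp [foldRem]
  | cons l ls ih =>
    have hlx : l ≠ x := fun e => h (by simp [e])
    have step : (PySem.List.remove? (x :: a) l).getD (x :: a)
        = x :: (PySem.List.remove? a l).getD a := by
      rw [PySem.List.remove?_cons_of_ne a (Ne.symm hlx)]
      cases PySem.List.remove? a l <;> simp
    simp only [foldRem, List.foldl_cons] at *
    rw [step, ih _ (fun hm => h (by simp [hm]))]

theorem mem_of_mem_combsA (xs : List Int) (k : Nat) (c : List Int) (l : Int)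
    (hc : c ∈ combsA xs k) (hl : l ∈ c) : l ∈ xs := by
  induction xs generalizing k c with
  | nil =>
    cases k with
    | zero => simp [combsA] at hc; subst hc; simp at hl
    | succ k => simp [combsA] at hc
  | cons x xs ih =>
    cases k with
    | zero => simp [combsA] at hc; subst hc; simp at hl
    | succ k =>
      simp only [combsA] at hc
      split at hc
      · simp at hc
      · simp only [List.mem_append, List.mem_map] at hc
        rcases hc with ⟨c', hc', rfl⟩ | hc
        · rcases List.mem_cons.mp hl with rfl | hl'
          · simp
          · exact List.mem_cons_of_mem _ (ih k c' hc' hl')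
        · exact List.mem_cons_of_mem _ (ih (k+1) c hc hl)

theorem genB_eq (items : List Int) (k : Nat) (hnd : items.Nodup) :
    genB items (k : Int) = (combsA items k).map (fun c => (c, foldRem items c)) := by
  induction items generalizing k with
  | nil =>
    cases k with
    | zero => simp [genB, combsA, foldRem]
    | succ k =>
      have hk : ¬ (((k + 1 : Nat) : Int) = 0) := by push_cast; omega
      rw [genB, if_neg hk, if_pos (by right; push_cast; simp)]
      simp [combsA]
  | cons x xs ih =>
    rcases List.nodup_cons.mp hnd with ⟨hx, hxs⟩
    cases k with
    | zero => simp [genB, combsA, foldRem]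
    | succ k =>
      have hk : ¬ (((k + 1 : Nat) : Int) = 0) := by push_cast; omega
      rw [genB, if_neg hk]
      by_cases hb : xs.length + 1 < k + 1
      · rw [if_pos (by right; push_cast; simp; omega)]
        simp only [combsA, if_pos hb, List.map_nil]
      · rw [if_neg (by push_cast; simp; omega)]
        have h1 : ((k + 1 : Nat) : Int) - 1 = ((k : Nat) : Int) := by push_cast; ring
        rw [h1, ih k hxs, ih (k+1) hxs]
        simp only [combsA, if_neg hb, List.map_append, List.map_map]
        congr 1
        · apply List.map_congr_left
          intro c _
          simp [Function.comp, foldRem_cons_self]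
        · apply List.map_congr_left
          intro c hc
          have hxc : x ∉ c := fun hm => hx (mem_of_mem_combsA xs (k+1) c x hc hm)
          simp [Function.comp, foldRem_cons_of_notmem x xs c hxc]

-- ===== VERDICT (by name: the statement is the Claim_ definition above) =====
theorem generate_ul_and_rm_labels_spec : Claim_equal_generate_ul_and_rm_labels := by
  intro K_ul K _ hpre
  obtain ⟨n, rfl⟩ : ∃ n : Nat, K_ul = (n : Int) :=
    ⟨K_ul.toNat, (Int.toNat_of_nonneg hpre).symm⟩
  unfold Spec_generate_ul_and_rm_labels generate_ul_and_rm_labels generate_ul_and_rm_labels_alt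
  rw [genB_eq _ _ (PySem.List.nodup_pyRange_one 0 K)]
  simp [List.map_map, Function.comp_def, foldRem]
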